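-- pv_equiv track=rewrite | github.com/v1shay/vectra | vectra/runtime_service.py | _select_ollama_model
-- ===== SOURCE A (Python) =====
-- PREFERRED_OLLAMA_MODEL_HINTS = (
--     "qwen2.5-coder",
--     "deepseek-coder-v2",
--     "qwen",
--     "deepseek",
--     "coder",
-- )
--
-- def _select_ollama_model(model_names: list[str]) -> str | None:
--     if not model_names:
--         return None
--
--     lowered = [(model_name, model_name.lower()) for model_name in model_names]
--     for hint in PREFERRED_OLLAMA_MODEL_HINTS:
--         for model_name, lowered_name in lowered:
--             if hint in lowered_name:
--                 return model_name
--     return model_names[0]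
-- ===== SOURCE B (Python) =====
-- PREFERRED_OLLAMA_MODEL_HINTS = (
--     "qwen2.5-coder",
--     "deepseek-coder-v2",
--     "qwen",
--     "deepseek",
--     "coder",
-- )
--
--
-- def _priority(model_name: str) -> int:
--     lowered = model_name.lower()
--     for i, hint in enumerate(PREFERRED_OLLAMA_MODEL_HINTS):
--         if hint in lowered:
--             return i
--     return len(PREFERRED_OLLAMA_MODEL_HINTS)
--
--
-- def _select_ollama_model(model_names: list[str]) -> str | None:
--     if not model_names:
--         return None
--     return min(model_names, key=_priority)
-- ===== Notes on version B (the rewrite author's own statement) =====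
-- stated objective: idiomatic
-- what changed: Replaced the hint-outer/model-inner nested early-return scan by a priority key function (index of the first matching hint) and a single min(model_names, key=...) pass; min's first-minimum tie-breaking reproduces A's selection order and the all-miss fallback to model_names[0].
import Mathlib
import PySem

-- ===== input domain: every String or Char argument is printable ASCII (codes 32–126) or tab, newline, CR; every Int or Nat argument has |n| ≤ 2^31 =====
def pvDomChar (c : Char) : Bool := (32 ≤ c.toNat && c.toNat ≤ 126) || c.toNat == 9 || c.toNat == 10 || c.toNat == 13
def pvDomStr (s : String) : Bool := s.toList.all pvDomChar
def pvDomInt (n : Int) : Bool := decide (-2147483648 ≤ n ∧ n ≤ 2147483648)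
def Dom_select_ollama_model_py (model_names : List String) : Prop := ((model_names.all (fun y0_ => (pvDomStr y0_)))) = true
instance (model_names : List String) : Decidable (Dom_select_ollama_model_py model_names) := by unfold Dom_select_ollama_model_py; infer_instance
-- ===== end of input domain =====

-- B replaces A's hint-outer/model-inner early-return scan by a priority key
-- (index of the first matching hint) and a single first-minimum pass (idiomatic).

-- ===== PORT A =====
def pvHints : List String :=
  ["qwen2.5-coder", "deepseek-coder-v2", "qwen", "deepseek", "coder"]

-- the nested 'for hint … for model_name, lowered_name …' with early return
def pvHintScan (lowered : List (String × String)) : List String → Option String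
  | [] => none
  | h :: hs =>
    match lowered.find? (fun p => PySem.Str.isIn h p.2) with
    | some p => some p.1
    | none => pvHintScan lowered hs

def select_ollama_model_py (model_names : List String) : Option String :=
  if model_names.isEmpty then none
  else
    let lowered := model_names.map (fun m => (m, PySem.Str.lower m))
    match pvHintScan lowered pvHints with
    | some m => some m
    | none => model_names.head?

-- ===== PORT B =====
-- index of the first hint contained in the lowered name, else the number of hints
def pvPrioGo (lowered : String) : List String → Nat
  | [] => 0
  | h :: hs => if PySem.Str.isIn h lowered then 0 else 1 + pvPrioGo lowered hs

def pvPriority (model_name : String) : Nat :=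
  let lowered := PySem.Str.lower model_name
  pvPrioGo lowered pvHints

def select_ollama_model_py_alt (model_names : List String) : Option String :=
  if model_names.isEmpty then none
  else PySem.List.min? model_names pvPriority

-- ===== PRECONDITION & SPEC =====
def Spec_select_ollama_model_py (model_names : List String) (out : Option String) : Prop := out = select_ollama_model_py_alt model_names
instance (model_names : List String) (out : Option String) : Decidable (Spec_select_ollama_model_py model_names out) := by unfold Spec_select_ollama_model_py; infer_instance

-- ===== CLAIM (what is proved, stated in full; the proofs are below) =====
def Claim_equal_select_ollama_model_py : Prop := ∀ (model_names : List String), Dom_select_ollama_model_py model_names → Spec_select_ollama_model_py model_names (select_ollama_model_py model_names)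

-- ===== LEMMAS AND PROOFS =====

-- the first-minimum step of Python's min with a key
def pvStep (f : String → Nat) (m c : String) : String := if f c < f m then c else m

lemma pv_min?_cons (f : String → Nat) (x : String) (rest : List String) :
    PySem.List.min? (x :: rest) f = some (rest.foldl (pvStep f) x) := by
  induction rest generalizing x with
  | nil => rfl
  | cons r rs ih =>
    have h1 : PySem.List.min? (x :: r :: rs) f = PySem.List.min? (pvStep f x r :: rs) f := by
      show List.foldl _ none (x :: r :: rs) = List.foldl _ none (pvStep f x r :: rs)
      rw [List.foldl_cons, List.foldl_cons, List.foldl_cons]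
      congr 1
      show (if f r < f x then some r else some x) = some (pvStep f x r)
      simp only [pvStep]
      exact (apply_ite some _ _ _).symm
    rw [h1, ih, List.foldl_cons]

lemma pv_find?_congr (p q : String → Bool) (l : List String)
    (hpq : ∀ a, p a = q a) : l.find? p = l.find? q := by
  induction l with
  | nil => rfl
  | cons a l ih => simp only [List.find?, hpq, ih]

lemma pv_fold_keep_bot (f : String → Nat) (x : String) (rest : List String)
    (hx : f x = 0) : rest.foldl (pvStep f) x = x := by
  induction rest with
  | nil => rfl
  | cons r rs ih =>
    have : pvStep f x r = x := by simp [pvStep, hx]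
    rw [List.foldl_cons, this, ih]

lemma pv_fold_first_zero (f : String → Nat) (p : String) (rest : List String) :
    ∀ x : String, (x :: rest).find? (fun c => f c == 0) = some p →
      rest.foldl (pvStep f) x = p := by
  induction rest with
  | nil =>
    intro x h
    by_cases hx : f x = 0
    · rw [List.find?_cons_of_pos (by simp [hx])] at h
      simpa using (Option.some.inj h)
    · rw [List.find?_cons_of_neg (by simp [hx])] at h
      simp at h
  | cons r rs ih =>
    intro x h
    by_cases hx : f x = 0
    · rw [List.find?_cons_of_pos (by simp [hx])] at h
      have hp : x = p := Option.some.inj h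
      have hstep : pvStep f x r = x := by simp [pvStep, hx]
      rw [List.foldl_cons, hstep, pv_fold_keep_bot f x rs hx]
      exact hp
    · rw [List.find?_cons_of_neg (by simp [hx])] at h
      by_cases hr : f r = 0
      · rw [List.find?_cons_of_pos (by simp [hr])] at h
        have hp : r = p := Option.some.inj h
        have hstep : pvStep f x r = r := by
          simp only [pvStep, hr]
          rw [if_pos (Nat.pos_of_ne_zero hx)]
        rw [List.foldl_cons, hstep, pv_fold_keep_bot f r rs hr]
        exact hp
      · rw [List.find?_cons_of_neg (by simp [hr])] at h
        rw [List.foldl_cons]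
        apply ih
        have hy : ¬ f (pvStep f x r) = 0 := by
          simp only [pvStep]; split_ifs <;> assumption
        rw [List.find?_cons_of_neg (by simp [hy])]
        exact h

lemma pv_fold_shift (f g : String → Nat) (x : String) (rest : List String)
    (h : ∀ c ∈ x :: rest, f c = 1 + g c) :
    rest.foldl (pvStep f) x = rest.foldl (pvStep g) x := by
  induction rest generalizing x with
  | nil => rfl
  | cons r rs ih =>
    have hx := h x (by simp)
    have hr := h r (by simp)
    have hstep : pvStep f x r = pvStep g x r := by
      simp only [pvStep, hx, hr]
      split_ifs with h1 h2 h2 <;> first | rfl | omega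
    rw [List.foldl_cons, List.foldl_cons, hstep]
    apply ih
    intro c hc
    rcases List.mem_cons.mp hc with hc | hc
    · rw [hc]
      simp only [pvStep]
      split_ifs
      · exact hr
      · exact hx
    · exact h c (List.mem_cons_of_mem _ (List.mem_cons_of_mem _ hc))

lemma pv_scan_min (hs : List String) (x : String) (rest : List String) :
    (pvHintScan ((x :: rest).map (fun m => (m, PySem.Str.lower m))) hs).getD x
      = rest.foldl (pvStep (fun m => pvPrioGo (PySem.Str.lower m) hs)) x := by
  induction hs with
  | nil =>
    simp only [pvHintScan, Option.getD]
    exact (pv_fold_keep_bot _ _ _ rfl).symm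
  | cons h hs ih =>
    have hmap : ((x :: rest).map (fun m => (m, PySem.Str.lower m))).find?
          (fun p => PySem.Str.isIn h p.2)
        = ((x :: rest).find? (fun m => PySem.Str.isIn h (PySem.Str.lower m))).map
            (fun m => (m, PySem.Str.lower m)) := by
      rw [List.find?_map]; rfl
    have hpred : ∀ c, ((pvPrioGo (PySem.Str.lower c) (h :: hs)) == 0)
        = PySem.Str.isIn h (PySem.Str.lower c) := by
      intro c
      simp only [pvPrioGo]
      by_cases hc : PySem.Chars.isIn h.toList (PySem.Chars.lower c.toList) = true <;>
        simp [PySem.Str.isIn, hc]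
    cases hfind : (x :: rest).find? (fun m => PySem.Str.isIn h (PySem.Str.lower m)) with
    | some p =>
      have hL : pvHintScan ((x :: rest).map (fun m => (m, PySem.Str.lower m))) (h :: hs)
          = some p := by
        simp only [pvHintScan, hmap, hfind, Option.map_some]
      rw [hL]
      have hz : (x :: rest).find? (fun c => (pvPrioGo (PySem.Str.lower c) (h :: hs)) == 0)
          = some p := by
        rw [pv_find?_congr _ _ _ hpred]
        exact hfind
      exact (pv_fold_first_zero _ _ _ _ hz).symm
    | none =>
      have hL : pvHintScan ((x :: rest).map (fun m => (m, PySem.Str.lower m))) (h :: hs)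
          = pvHintScan ((x :: rest).map (fun m => (m, PySem.Str.lower m))) hs := by
        simp only [pvHintScan, hmap, hfind, Option.map_none]
      rw [hL, ih]
      refine (pv_fold_shift _ _ _ _ ?_).symm
      intro c hc
      have hcf := List.find?_eq_none.mp hfind c hc
      simp only [Bool.not_eq_true] at hcf
      simp at hcf
      simp [pvPrioGo, PySem.Str.isIn, hcf]

-- ===== VERDICT (by name: the statement is the Claim_ definition above) =====
theorem select_ollama_model_py_spec : Claim_equal_select_ollama_model_py := by
  intro model_names _
  unfold Spec_select_ollama_model_py
  cases model_names with
  | nil => rfl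
  | cons x rest =>
    unfold select_ollama_model_py select_ollama_model_py_alt
    simp only [List.isEmpty_cons, if_neg, Bool.false_eq_true, not_false_iff]
    rw [pv_min?_cons]
    have hm : (match pvHintScan ((x :: rest).map (fun m => (m, PySem.Str.lower m))) pvHints with
        | some m => some m
        | none => (x :: rest).head?)
        = some ((pvHintScan ((x :: rest).map (fun m => (m, PySem.Str.lower m))) pvHints).getD x) := by
      cases pvHintScan ((x :: rest).map (fun m => (m, PySem.Str.lower m))) pvHints <;> rfl
    rw [hm, pv_scan_min]
    rfl
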